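-- pv_equiv track=rewrite | github.com/31b4/leetcode | 1420. Build Array Where You Can Find The Maximum Exactly K Comparisons/main.py | numOfArrays
-- ===== SOURCE A (Python) =====
-- def numOfArrays(n: int, m: int, k: int) -> int:
--     def dfs(n,m,k,i,currentMax,currentCost,dp):
--         if i == n:
--             return 1 if k == currentCost else 0
--         if dp[i][currentMax][currentCost] != None:
--             return dp[i][currentMax][currentCost]
--         ans = 0
--         for num in range(1,m+1):
--             newCost = currentCost
--             newMax = currentMax
--             if num > currentMax:
--                 newCost += 1
--                 newMax = num
--             if newCost > k:
--                 break
--             ans += dfs(n, m, k, i+1, newMax, newCost, dp)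
--             ans %= 1000000007
--         dp[i][currentMax][currentCost] = ans
--         return ans
--     dp = [[[None for _ in range(k + 1)] for _ in range(m + 1)] for _ in range(n + 1)]
--     return dfs(n, m, k, 0, 0, 0, dp)
-- ===== SOURCE B (Python) =====
-- def numOfArrays(n: int, m: int, k: int) -> int:
--     # Bottom-up DP over "remaining slots", with suffix sums collapsing A's
--     # inner loop over candidate values: O(n*m*k) instead of O(n*m^2*k).
--     if n == 0:
--         return 1 if k == 0 else 0
--     MOD = 1000000007
--     # ways[cm][cc] = number of ways to fill the remaining slots, given the
--     # running maximum is cm and the search cost so far is cc (mod MOD).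
--     ways = [[1 if cc == k else 0 for cc in range(k + 1)] for _ in range(m + 1)]
--     for _ in range(n):
--         new = []
--         suf = [0] * (k + 1)  # suf[cc] = sum of ways[j][cc] over j already seen (j > cm)
--         for cm in reversed(range(m + 1)):
--             new.append([(cm * ways[cm][cc] + (suf[cc + 1] if cc < k else 0)) % MOD
--                         for cc in range(k + 1)])
--             suf = [(s + w) % MOD for s, w in zip(suf, ways[cm])]
--         ways = new[::-1]
--     return ways[0][0]
-- ===== Notes on version B (the rewrite author's own statement) =====
-- stated objective: faster
-- what changed: A's memoized top-down DFS over (index, currentMax, currentCost) with an inner loop over all m candidate values is replaced by a bottom-up DP over remaining slots whose inner value-loop is collapsed into suffix sums over the max dimension, dropping a factor of m.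
-- outside the precondition, e.g. on numOfArrays(-1, 2, 2): A raises IndexError, B returns 0; on numOfArrays(1, -1, 0): A raises IndexError, B raises IndexError; on numOfArrays(1, 2, -1): A raises IndexError, B raises IndexError
import Mathlib
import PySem

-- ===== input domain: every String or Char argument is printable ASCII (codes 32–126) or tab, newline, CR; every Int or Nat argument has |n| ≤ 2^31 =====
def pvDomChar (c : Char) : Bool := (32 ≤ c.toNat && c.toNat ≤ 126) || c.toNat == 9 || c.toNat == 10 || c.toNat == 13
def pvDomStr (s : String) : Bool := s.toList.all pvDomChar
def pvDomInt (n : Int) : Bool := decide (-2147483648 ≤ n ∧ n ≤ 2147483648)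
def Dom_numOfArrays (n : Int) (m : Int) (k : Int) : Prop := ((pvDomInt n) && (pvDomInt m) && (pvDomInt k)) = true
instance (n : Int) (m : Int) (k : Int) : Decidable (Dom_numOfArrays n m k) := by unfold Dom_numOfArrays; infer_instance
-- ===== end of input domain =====

-- B replaces A's memoized DFS (O(n*m^2*k)) by a bottom-up DP over remaining slots whose
-- inner value-loop is collapsed with suffix sums (O(n*m*k)); equal return value on Pre_.


-- ===== PORT A =====
-- dp is dfs's 3-level memo table; inside Pre_ every index i/currentMax/currentCost is
-- nonnegative and in range, so `getD`/`set` at `.toNat` indices is exact Python indexing.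
def pvGet3 (dp : List (List (List (Option Int)))) (a b c : Nat) : Option Int :=
  ((dp.getD a []).getD b []).getD c none

def pvSet2 (row : List (List (Option Int))) (b c : Nat) (v : Option Int) :
    List (List (Option Int)) :=
  row.set b ((row.getD b []).set c v)

def pvSet3 (dp : List (List (List (Option Int)))) (a b c : Nat) (v : Option Int) :
    List (List (List (Option Int))) :=
  dp.set a (pvSet2 (dp.getD a []) b c v)

-- dfs recurses with i+1 until i == n; fuel = (n - i).toNat makes that structural
-- (the fuel-0/i ≠ n branch is never reached on Pre_ inputs).
mutual
def dfsA (n m k : Int) (fuel : Nat) (i currentMax currentCost : Int)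
    (dp : List (List (List (Option Int)))) : Int × List (List (List (Option Int))) :=
  if i = n then (if k = currentCost then 1 else 0, dp)
  else
    match fuel with
    | 0 => (0, dp)   -- unreachable when fuel ≥ (n-i).toNat and 0 ≤ i
    | fuel' + 1 =>
      match pvGet3 dp i.toNat currentMax.toNat currentCost.toNat with
      | some v => (v, dp)
      | none =>
        let r := loopA n m k fuel' i currentMax currentCost
                   (PySem.List.pyRange 1 (m + 1) 1) 0 dp
        (r.1, pvSet3 r.2 i.toNat currentMax.toNat currentCost.toNat (some r.1))
termination_by (fuel, 0)

def loopA (n m k : Int) (fuel : Nat) (i currentMax currentCost : Int)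
    (nums : List Int) (ans : Int) (dp : List (List (List (Option Int)))) :
    Int × List (List (List (Option Int))) :=
  match nums with
  | [] => (ans, dp)
  | num :: rest =>
    let newCost := if num > currentMax then currentCost + 1 else currentCost
    let newMax := if num > currentMax then num else currentMax
    if newCost > k then (ans, dp)
    else
      let r := dfsA n m k fuel (i + 1) newMax newCost dp
      loopA n m k fuel i currentMax currentCost rest
        (PySem.Int.mod (ans + r.1) 1000000007) r.2
termination_by (fuel, nums.length + 1)
end

def numOfArrays (n : Int) (m : Int) (k : Int) : Int :=
  (dfsA n m k n.toNat 0 0 0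
    (List.replicate (n + 1).toNat
      (List.replicate (m + 1).toNat (List.replicate (k + 1).toNat none)))).1

-- ===== PORT B =====
-- ways[cm][cc] = number of ways to fill the remaining slots given running max cm and
-- cost so far cc (mod 1e9+7); one step per slot, suffix sums `suf` over the max dimension.
def bRow (m k : Int) (ways : List (List Int)) (suf : List Int) (cm : Int) : List Int :=
  (PySem.List.pyRange 0 (k + 1) 1).map (fun cc =>
    PySem.Int.mod (cm * PySem.List.pyGetD (PySem.List.pyGetD ways cm []) cc 0 +
      (if cc < k then PySem.List.pyGetD suf (cc + 1) 0 else 0)) 1000000007)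

def bStep (m k : Int) (ways : List (List Int)) : List (List Int) :=
  (((PySem.List.pyRange 0 (m + 1) 1).reverse).foldl
    (fun (st : List (List Int) × List Int) cm =>
      (st.1 ++ [bRow m k ways st.2 cm],
       List.zipWith (fun s w => PySem.Int.mod (s + w) 1000000007) st.2
         (PySem.List.pyGetD ways cm [])))
    ([], List.replicate (k + 1).toNat 0)).1.reverse

def numOfArrays_alt (n : Int) (m : Int) (k : Int) : Int :=
  if n = 0 then (if k = 0 then 1 else 0)
  else
    let ways0 : List (List Int) :=
      (PySem.List.pyRange 0 (m + 1) 1).map (fun _ =>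
        (PySem.List.pyRange 0 (k + 1) 1).map (fun cc => if cc = k then 1 else 0))
    let ways := (PySem.List.pyRange 0 n 1).foldl (fun w _ => bStep m k w) ways0
    PySem.List.pyGetD (PySem.List.pyGetD ways 0 []) 0 0

-- ===== PRECONDITION & SPEC =====
-- A raises IndexError when n < 0, or when n ≥ 1 and m < 0 or k < 0 (the memo table then
-- has an empty dimension); exactly those inputs are excluded. For n = 0 A returns for
-- every m, k.
def Pre_numOfArrays (n : Int) (m : Int) (k : Int) : Prop :=
  n = 0 ∨ (1 ≤ n ∧ 0 ≤ m ∧ 0 ≤ k)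
instance (n : Int) (m : Int) (k : Int) : Decidable (Pre_numOfArrays n m k) := by
  unfold Pre_numOfArrays; infer_instance

def pvWitness_numOfArrays : Int × Int × Int := (3, 2, 1)

def Spec_numOfArrays (n : Int) (m : Int) (k : Int) (out : Int) : Prop := out = numOfArrays_alt n m k
instance (n : Int) (m : Int) (k : Int) (out : Int) : Decidable (Spec_numOfArrays n m k out) := by unfold Spec_numOfArrays; infer_instance

-- ===== CLAIM (what is proved, stated in full; the proofs are below) =====
def Claim_equal_numOfArrays : Prop := ∀ (n : Int) (m : Int) (k : Int), Dom_numOfArrays n m k → Pre_numOfArrays n m k → Spec_numOfArrays n m k (numOfArrays n m k)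

-- ===== LEMMAS AND PROOFS =====

-- Reference function: pvF m k r cm cc = the value A's dfs computes with r slots left.
mutual
def pvF (m k : Int) (r : Nat) (cm cc : Int) : Int :=
  match r with
  | 0 => if k = cc then 1 else 0
  | r' + 1 => pvFloop m k r' cm cc (PySem.List.pyRange 1 (m + 1) 1) 0
termination_by (r, 0)

def pvFloop (m k : Int) (r : Nat) (cm cc : Int) (nums : List Int) (ans : Int) : Int :=
  match nums with
  | [] => ans
  | num :: rest =>
    let nc := if num > cm then cc + 1 else cc
    let nm := if num > cm then num else cm
    if nc > k then ans
    else pvFloop m k r cm cc rest (PySem.Int.mod (ans + pvF m k r nm nc) 1000000007)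
termination_by (r, nums.length + 1)
end

lemma pvmod_eq (x : Int) : PySem.Int.mod x 1000000007 = x % 1000000007 :=
  PySem.Int.mod_eq_emod_of_pos (by norm_num)

lemma pvmod_addl (a b : Int) :
    (a % 1000000007 + b) % 1000000007 = (a + b) % 1000000007 := Int.emod_add_emod _ _ _

lemma pvmod_addr (a b : Int) :
    (a + b % 1000000007) % 1000000007 = (a + b) % 1000000007 := by
  rw [add_comm, pvmod_addl, add_comm]

-- ---- memo-table access lemmas ----

lemma pvSetGetD {α : Type} (l : List α) (i j : Nat) (x d : α) :
    (l.set i x).getD j d = if i = j ∧ i < l.length then x else l.getD j d := by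
  rw [List.getD_eq_getElem?_getD, List.getD_eq_getElem?_getD, List.getElem?_set]
  by_cases hij : i = j
  · subst hij
    by_cases hl : i < l.length
    · simp [hl]
    · simp [hl, List.getElem?_eq_none (by omega : l.length ≤ i)]
  · simp [hij]

lemma pvRepGetD {α : Type} (p i : Nat) (x d : α) :
    (List.replicate p x).getD i d = if i < p then x else d := by
  rw [List.getD_eq_getElem?_getD, List.getElem?_replicate]
  split_ifs <;> simp

lemma pvSet2_get (row : List (List (Option Int))) (b c b' c' : Nat) (v : Option Int) (w : Int)
    (h : (((pvSet2 row b c v).getD b' []).getD c' none) = some w) :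
    ((row.getD b' []).getD c' none) = some w ∨ (b' = b ∧ c' = c ∧ v = some w) := by
  unfold pvSet2 at h
  rw [pvSetGetD] at h
  by_cases hb : b = b' ∧ b < row.length
  · rw [if_pos hb] at h
    rw [pvSetGetD] at h
    by_cases hc : c = c' ∧ c < (row.getD b []).length
    · rw [if_pos hc] at h
      right; exact ⟨hb.1.symm, hc.1.symm, h⟩
    · rw [if_neg hc] at h
      left; rw [← hb.1]; exact h
  · rw [if_neg hb] at h
    left; exact h

lemma pvSet3_get (dp : List (List (List (Option Int)))) (a b c a' b' c' : Nat)
    (v : Option Int) (w : Int)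
    (h : pvGet3 (pvSet3 dp a b c v) a' b' c' = some w) :
    pvGet3 dp a' b' c' = some w ∨ (a' = a ∧ b' = b ∧ c' = c ∧ v = some w) := by
  unfold pvGet3 pvSet3 at *
  rw [pvSetGetD] at h
  by_cases ha : a = a' ∧ a < dp.length
  · rw [if_pos ha] at h
    rcases pvSet2_get _ b c b' c' v w h with h1 | h2
    · left; rw [← ha.1]; exact h1
    · right; exact ⟨ha.1.symm, h2.1, h2.2.1, h2.2.2⟩
  · rw [if_neg ha] at h
    left; exact h

def pvValid (n m k : Int) (dp : List (List (List (Option Int)))) : Prop :=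
  ∀ a b c (w : Int), pvGet3 dp a b c = some w →
    w = pvF m k (n.toNat - a) (b : Int) (c : Int)

lemma pvValid_init (n m k : Int) :
    pvValid n m k (List.replicate (n + 1).toNat
      (List.replicate (m + 1).toNat (List.replicate (k + 1).toNat none))) := by
  intro a b c w h
  exfalso
  unfold pvGet3 at h
  rw [pvRepGetD] at h
  by_cases h1 : a < (n + 1).toNat
  · rw [if_pos h1, pvRepGetD] at h
    by_cases h2 : b < (m + 1).toNat
    · rw [if_pos h2, pvRepGetD] at h
      split_ifs at h <;> simp at h
    · rw [if_neg h2] at h; simp at h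
  · rw [if_neg h1] at h; simp at h

-- ---- A's dfs computes pvF ----

lemma loopA_correct (n m k : Int) (fuel : Nat)
    (IH : ∀ (i cm cc : Int) dp, pvValid n m k dp → 0 ≤ i → i ≤ n →
      (n - i).toNat ≤ fuel → 0 ≤ cm → cm ≤ m → 0 ≤ cc → cc ≤ k →
      (dfsA n m k fuel i cm cc dp).1 = pvF m k (n - i).toNat cm cc ∧
      pvValid n m k (dfsA n m k fuel i cm cc dp).2) :
    ∀ (lst : List Int) (i cm cc ans : Int) dp, pvValid n m k dp →
      (∀ x ∈ lst, 1 ≤ x ∧ x ≤ m) →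
      0 ≤ i → i < n → (n - (i + 1)).toNat ≤ fuel →
      0 ≤ cm → cm ≤ m → 0 ≤ cc → cc ≤ k →
      (loopA n m k fuel i cm cc lst ans dp).1 =
        pvFloop m k (n - (i + 1)).toNat cm cc lst ans ∧
      pvValid n m k (loopA n m k fuel i cm cc lst ans dp).2 := by
  intro lst
  induction lst with
  | nil =>
    intro i cm cc ans dp hv _ _ _ _ _ _ _ _
    rw [loopA, pvFloop]
    exact ⟨rfl, hv⟩
  | cons num rest ihl =>
    intro i cm cc ans dp hv hmem hi0 hin hfuel hcm0 hcmm hcc0 hcck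
    rw [loopA, pvFloop]
    dsimp only
    by_cases hbr : (if num > cm then cc + 1 else cc) > k
    · rw [if_pos hbr, if_pos hbr]; exact ⟨rfl, hv⟩
    · rw [if_neg hbr, if_neg hbr]
      have hnum := hmem num (by simp)
      have hdfs := IH (i + 1) (if num > cm then num else cm)
        (if num > cm then cc + 1 else cc) dp hv (by omega) (by omega)
        (by omega) (by split <;> omega) (by split <;> omega)
        (by split <;> omega) (by omega)
      have hrec := ihl i cm cc
        (PySem.Int.mod (ans + (dfsA n m k fuel (i + 1) (if num > cm then num else cm)
          (if num > cm then cc + 1 else cc) dp).1) 1000000007)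
        (dfsA n m k fuel (i + 1) (if num > cm then num else cm)
          (if num > cm then cc + 1 else cc) dp).2
        hdfs.2 (fun x hx => hmem x (by simp [hx])) hi0 hin hfuel hcm0 hcmm hcc0 hcck
      rw [hdfs.1] at hrec ⊢
      exact hrec

lemma dfsA_correct (n m k : Int) :
    ∀ (fuel : Nat) (i cm cc : Int) dp, pvValid n m k dp → 0 ≤ i → i ≤ n →
      (n - i).toNat ≤ fuel → 0 ≤ cm → cm ≤ m → 0 ≤ cc → cc ≤ k →
      (dfsA n m k fuel i cm cc dp).1 = pvF m k (n - i).toNat cm cc ∧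
      pvValid n m k (dfsA n m k fuel i cm cc dp).2 := by
  intro fuel
  induction fuel with
  | zero =>
    intro i cm cc dp hv hi0 hin hfuel _ _ _ _
    by_cases hieq : i = n
    · rw [dfsA, if_pos hieq]
      refine ⟨?_, hv⟩
      rw [show (n - i).toNat = 0 by omega, pvF]
    · exfalso; omega
  | succ fuel' ih =>
    intro i cm cc dp hv hi0 hin hfuel hcm0 hcmm hcc0 hcck
    by_cases hieq : i = n
    · rw [dfsA, if_pos hieq]
      refine ⟨?_, hv⟩
      rw [show (n - i).toNat = 0 by omega, pvF]
    · rw [dfsA, if_neg hieq]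
      dsimp only
      cases hmem : pvGet3 dp i.toNat cm.toNat cc.toNat with
      | some v =>
        simp only [hmem]
        refine ⟨?_, hv⟩
        have := hv i.toNat cm.toNat cc.toNat v hmem
        rw [this, Int.toNat_of_nonneg hcm0, Int.toNat_of_nonneg hcc0]
        congr 1
        omega
      | none =>
        simp only [hmem]
        have hloop := loopA_correct n m k fuel' ih
          (PySem.List.pyRange 1 (m + 1) 1) i cm cc 0 dp hv
          (fun x hx => by
            rw [PySem.List.mem_pyRange_one] at hx
            omega)
          hi0 (by omega) (by omega) hcm0 hcmm hcc0 hcck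
        refine ⟨?_, ?_⟩
        · rw [hloop.1, show (n - i).toNat = (n - (i + 1)).toNat + 1 by omega, pvF]
        · intro a b c w h
          rcases pvSet3_get _ i.toNat cm.toNat cc.toNat a b c _ w h with h1 | h2
          · exact hloop.2 a b c w h1
          · obtain ⟨ha, hb, hc, hval⟩ := h2
            subst ha; subst hb; subst hc
            rw [Option.some_inj] at hval
            rw [← hval, hloop.1, Int.toNat_of_nonneg hcm0, Int.toNat_of_nonneg hcc0,
              show n.toNat - i.toNat = (n - (i + 1)).toNat + 1 by omega, pvF]

-- ---- B computes pvF ----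

def cTab (m k : Int) (t : Nat) : List (List Int) :=
  (PySem.List.pyRange 0 (m + 1) 1).map (fun cm =>
    (PySem.List.pyRange 0 (k + 1) 1).map (fun cc => pvF m k t cm cc))

def cSuf (m k : Int) (t : Nat) (j : Int) : List Int :=
  (PySem.List.pyRange 0 (k + 1) 1).map (fun cc =>
    ((PySem.List.pyRange j (m + 1) 1).map (fun x => pvF m k t x cc)).sum % 1000000007)

lemma pvFloop_low (m k : Int) (t : Nat) (cm cc : Int) (hcck : cc ≤ k) :
    ∀ (lst l2 : List Int) (ans : Int), (∀ x ∈ lst, x ≤ cm) →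
      pvFloop m k t cm cc (lst ++ l2) ans =
      pvFloop m k t cm cc l2
        (lst.foldl (fun a _ => (a + pvF m k t cm cc) % 1000000007) ans) := by
  intro lst
  induction lst with
  | nil => intro l2 ans _; simp
  | cons x rest ih =>
    intro l2 ans hmem
    have hx : ¬ x > cm := by have := hmem x (by simp); omega
    rw [List.cons_append, pvFloop]
    rw [if_neg hx, if_neg hx, if_neg (show ¬ cc > k by omega), List.foldl_cons, pvmod_eq]
    exact ih l2 _ (fun y hy => hmem y (by simp [hy]))

lemma pvFold_const {α : Type} (v : Int) :
    ∀ (lst : List α) (a : Int), lst ≠ [] →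
      lst.foldl (fun x _ => (x + v) % 1000000007) a =
      (a + lst.length * v) % 1000000007 := by
  intro lst
  induction lst with
  | nil => intro a h; exact absurd rfl h
  | cons x rest ih =>
    intro a _
    rw [List.foldl_cons]
    rcases List.eq_nil_or_concat rest with hr | _
    · subst hr; simp
    · have hne : rest ≠ [] := by rintro rfl; simp_all
      rw [ih _ hne, pvmod_addl]
      congr 1
      simp [List.length_cons]
      push_cast
      ring

lemma pvFloop_high (m k : Int) (t : Nat) (cm cc : Int) (hcc : cc < k) :
    ∀ (lst : List Int) (ans : Int), (∀ x ∈ lst, cm < x) →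
      pvFloop m k t cm cc lst ans =
      lst.foldl (fun a x => (a + pvF m k t x (cc + 1)) % 1000000007) ans := by
  intro lst
  induction lst with
  | nil => intro ans _; rw [pvFloop, List.foldl_nil]
  | cons x rest ih =>
    intro ans hmem
    have hx : x > cm := hmem x (by simp)
    rw [pvFloop]
    rw [if_pos hx, if_pos hx, if_neg (show ¬ cc + 1 > k by omega), List.foldl_cons, pvmod_eq]
    exact ih _ (fun y hy => hmem y (by simp [hy]))

lemma pvFold_add (g : Int → Int) :
    ∀ (lst : List Int) (a : Int), lst ≠ [] →
      lst.foldl (fun acc x => (acc + g x) % 1000000007) a =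
      (a + (lst.map g).sum) % 1000000007 := by
  intro lst
  induction lst with
  | nil => intro a h; exact absurd rfl h
  | cons x rest ih =>
    intro a _
    rw [List.foldl_cons]
    rcases List.eq_nil_or_concat rest with hr | _
    · subst hr; simp
    · have hne : rest ≠ [] := by rintro rfl; simp_all
      rw [ih _ hne, pvmod_addl, List.map_cons, List.sum_cons, add_assoc]

lemma pvFloop_closed (m k : Int) (t : Nat) (cm cc : Int)
    (h0 : 0 ≤ cm) (hcm : cm ≤ m) (hcc0 : 0 ≤ cc) (hcck : cc ≤ k) :
    pvFloop m k t cm cc (PySem.List.pyRange 1 (m + 1) 1) 0 =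
      (cm * pvF m k t cm cc +
        (if cc < k then
          ((PySem.List.pyRange (cm + 1) (m + 1) 1).map
            (fun x => pvF m k t x (cc + 1))).sum % 1000000007
        else 0)) % 1000000007 := by
  rw [PySem.List.pyRange_one_append 1 (cm + 1) (m + 1) (by omega) (by omega)]
  rw [pvFloop_low m k t cm cc hcck _ _ 0
    (fun x hx => by rw [PySem.List.mem_pyRange_one] at hx; omega)]
  -- value of the first (num ≤ cm) segment
  have hacc : (PySem.List.pyRange 1 (cm + 1) 1).foldl
      (fun a _ => (a + pvF m k t cm cc) % 1000000007) 0 =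
      if cm = 0 then 0 else (cm * pvF m k t cm cc) % 1000000007 := by
    by_cases hcm0 : cm = 0
    · subst hcm0
      rw [PySem.List.pyRange_one_eq_nil (by omega), List.foldl_nil, if_pos rfl]
    · rw [if_neg hcm0, pvFold_const _ _ _ (by
        rw [PySem.List.pyRange_one_cons (by omega : (1:Int) < cm + 1)]
        simp)]
      rw [PySem.List.length_pyRange_one]
      rw [show ((cm + 1 - 1).toNat : Int) = cm by omega]
      ring_nf
  rw [hacc]
  by_cases hck : cc < k
  · rw [if_pos hck]
    rw [pvFloop_high m k t cm cc hck _ _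
      (fun x hx => by rw [PySem.List.mem_pyRange_one] at hx; omega)]
    by_cases hl2 : cm = m
    · rw [hl2, PySem.List.pyRange_one_eq_nil le_rfl, List.foldl_nil, List.map_nil,
        List.sum_nil]
      split_ifs with h
      · simp [h]
      · rw [Int.zero_emod, add_zero]
    · have hne : PySem.List.pyRange (cm + 1) (m + 1) 1 ≠ [] := by
        rw [PySem.List.pyRange_one_cons (by omega : cm + 1 < m + 1)]
        simp
      rw [pvFold_add _ _ _ hne, pvmod_addr]
      split_ifs with h
      · simp [h]
      · rw [pvmod_addl]
  · rw [if_neg hck]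
    have hcceq : cc = k := by omega
    have hstop : ∀ a : Int, pvFloop m k t cm cc (PySem.List.pyRange (cm + 1) (m + 1) 1) a = a := by
      intro a
      by_cases hl2 : cm = m
      · rw [hl2, PySem.List.pyRange_one_eq_nil le_rfl, pvFloop]
      · rw [PySem.List.pyRange_one_cons (by omega : cm + 1 < m + 1), pvFloop]
        rw [if_pos (show cm + 1 > cm by omega), if_pos (show cc + 1 > k by omega)]
    rw [hstop]
    split_ifs with h
    · simp [h]
    · rw [add_zero]

lemma pvZip {α β γ : Type} (h : α → β → γ) (f : Int → α) (g : Int → β) :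
    ∀ l : List Int, List.zipWith h (l.map f) (l.map g) = l.map (fun x => h (f x) (g x)) := by
  intro l; induction l with
  | nil => simp
  | cons x rest ih => simp [ih]

lemma bRow_eq (m k : Int) (t : Nat) (j : Int) (hj0 : 0 ≤ j) (hjm : j ≤ m) :
    bRow m k (cTab m k t) (cSuf m k t (j + 1)) j =
    (PySem.List.pyRange 0 (k + 1) 1).map (fun cc => pvF m k (t + 1) j cc) := by
  unfold bRow
  apply List.map_congr_left
  intro cc hcc
  rw [PySem.List.mem_pyRange_one] at hcc
  rw [pvmod_eq]
  rw [show PySem.List.pyGetD (cTab m k t) j [] =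
      (PySem.List.pyRange 0 (k + 1) 1).map (fun cc => pvF m k t j cc) from
    PySem.List.pyGetD_map_pyRange_of_nonneg _ _ _ _ hj0 (by omega)]
  rw [PySem.List.pyGetD_map_pyRange_of_nonneg _ _ _ _ (by omega) (by omega)]
  rw [pvF, pvFloop_closed m k t j cc hj0 hjm (by omega) (by omega)]
  by_cases h : cc < k
  · rw [if_pos h, if_pos h]
    unfold cSuf
    rw [PySem.List.pyGetD_map_pyRange_of_nonneg _ _ _ _ (by omega) (by omega)]
  · rw [if_neg h, if_neg h]

lemma cSuf_step (m k : Int) (t : Nat) (j : Int) (hj0 : 0 ≤ j) (hjm : j ≤ m) :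
    List.zipWith (fun s w => PySem.Int.mod (s + w) 1000000007)
      (cSuf m k t (j + 1)) (PySem.List.pyGetD (cTab m k t) j []) = cSuf m k t j := by
  rw [show PySem.List.pyGetD (cTab m k t) j [] =
      (PySem.List.pyRange 0 (k + 1) 1).map (fun cc => pvF m k t j cc) from
    PySem.List.pyGetD_map_pyRange_of_nonneg _ _ _ _ hj0 (by omega)]
  unfold cSuf
  rw [pvZip]
  apply List.map_congr_left
  intro cc _
  rw [pvmod_eq, pvmod_addl]
  rw [PySem.List.pyRange_one_cons (show j < m + 1 by omega), List.map_cons, List.sum_cons]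
  congr 1
  ring

lemma cSuf_top (m k : Int) (t : Nat) :
    cSuf m k t (m + 1) = List.replicate (k + 1).toNat 0 := by
  unfold cSuf
  rw [PySem.List.pyRange_one_eq_nil le_rfl]
  simp only [List.map_nil, List.sum_nil, Int.zero_emod]
  rw [List.map_const', PySem.List.length_pyRange_one]
  norm_num

lemma bfold (m k : Int) (t : Nat) :
    ∀ (j : Nat), (j : Int) ≤ m + 1 → ∀ acc : List (List Int),
      ((PySem.List.pyRange 0 (j : Int) 1).reverse).foldl
        (fun (st : List (List Int) × List Int) cm =>
          (st.1 ++ [bRow m k (cTab m k t) st.2 cm],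
           List.zipWith (fun s w => PySem.Int.mod (s + w) 1000000007) st.2
             (PySem.List.pyGetD (cTab m k t) cm [])))
        (acc, cSuf m k t (j : Int))
      = (acc ++ ((PySem.List.pyRange 0 (j : Int) 1).reverse).map
           (fun cm => (PySem.List.pyRange 0 (k + 1) 1).map (fun cc => pvF m k (t + 1) cm cc)),
         cSuf m k t 0) := by
  intro j
  induction j with
  | zero =>
    intro _ acc
    rw [show ((0 : Nat) : Int) = 0 by norm_num, PySem.List.pyRange_one_eq_nil le_rfl]
    simp
  | succ j ih =>
    intro hj acc
    rw [show ((j + 1 : Nat) : Int) = (j : Int) + 1 by push_cast; ring]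
    rw [PySem.List.pyRange_one_succ_right (by positivity)]
    rw [List.reverse_append, List.reverse_singleton, List.singleton_append, List.foldl_cons]
    have hj0 : (0 : Int) ≤ (j : Int) := by positivity
    have hjm : (j : Int) ≤ m := by omega
    rw [bRow_eq m k t (j : Int) hj0 hjm, cSuf_step m k t (j : Int) hj0 hjm]
    rw [ih (by omega) _]
    rw [List.map_cons]
    simp [List.append_assoc]

lemma bStep_cTab (m k : Int) (hm : 0 ≤ m) (hk : 0 ≤ k) (t : Nat) :
    bStep m k (cTab m k t) = cTab m k (t + 1) := by
  unfold bStep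
  rw [show List.replicate (k + 1).toNat (0 : Int) = cSuf m k t (m + 1) from
    (cSuf_top m k t).symm]
  have h := bfold m k t (m + 1).toNat (by omega) []
  rw [show (((m + 1).toNat : Nat) : Int) = m + 1 by omega] at h
  rw [h]
  simp only [List.nil_append, List.map_reverse, List.reverse_reverse]
  rfl

lemma bIter (m k : Int) (hm : 0 ≤ m) (hk : 0 ≤ k) :
    ∀ (l : List Int) (t : Nat),
      l.foldl (fun w _ => bStep m k w) (cTab m k t) = cTab m k (t + l.length) := by
  intro l
  induction l with
  | nil => intro t; simp
  | cons x rest ih =>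
    intro t
    rw [List.foldl_cons, bStep_cTab m k hm hk t, ih (t + 1)]
    congr 1
    simp [List.length_cons]
    omega

lemma ways0_eq (m k : Int) :
    (PySem.List.pyRange 0 (m + 1) 1).map (fun _ =>
      (PySem.List.pyRange 0 (k + 1) 1).map (fun cc => if cc = k then (1 : Int) else 0)) =
    cTab m k 0 := by
  unfold cTab
  apply List.map_congr_left
  intro cm _
  apply List.map_congr_left
  intro cc _
  rw [pvF]
  by_cases h : cc = k
  · simp [h]
  · rw [if_neg h, if_neg (show ¬ k = cc from fun hh => h hh.symm)]

lemma alt_eq_pvF (n m k : Int) (hn : 1 ≤ n) (hm : 0 ≤ m) (hk : 0 ≤ k) :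
    numOfArrays_alt n m k = pvF m k n.toNat 0 0 := by
  unfold numOfArrays_alt
  rw [if_neg (by omega : ¬ n = 0)]
  dsimp only
  rw [ways0_eq, bIter m k hm hk, PySem.List.length_pyRange_one]
  rw [show PySem.List.pyGetD (cTab m k (0 + (n - 0).toNat)) 0 [] =
      (PySem.List.pyRange 0 (k + 1) 1).map (fun cc => pvF m k (0 + (n - 0).toNat) 0 cc) from
    PySem.List.pyGetD_map_pyRange_of_nonneg _ _ _ _ le_rfl (by omega)]
  rw [PySem.List.pyGetD_map_pyRange_of_nonneg _ _ _ _ le_rfl (by omega)]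
  congr 1
  omega

lemma dfsA_base (n m k : Int) (fuel : Nat) (i cm cc : Int)
    (dp : List (List (List (Option Int)))) (h : i = n) :
    dfsA n m k fuel i cm cc dp = (if k = cc then 1 else 0, dp) := by
  cases fuel <;> rw [dfsA, if_pos h]

lemma a_eq_pvF (n m k : Int) (hn : 1 ≤ n) (hm : 0 ≤ m) (hk : 0 ≤ k) :
    numOfArrays n m k = pvF m k n.toNat 0 0 := by
  unfold numOfArrays
  rw [(dfsA_correct n m k n.toNat 0 0 0 _ (pvValid_init n m k) le_rfl (by omega)
    (by omega) le_rfl hm le_rfl hk).1]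
  congr 1
  omega

-- ===== VERDICT (by name: the statement is the Claim_ definition above) =====
theorem numOfArrays_spec : Claim_equal_numOfArrays := by
  intro n m k _ hpre
  unfold Spec_numOfArrays
  rcases hpre with h0 | ⟨hn, hm, hk⟩
  · subst h0
    unfold numOfArrays numOfArrays_alt
    rw [dfsA_base 0 m k _ 0 0 0 _ rfl]
    norm_num
  · rw [a_eq_pvF n m k hn hm hk, alt_eq_pvF n m k hn hm hk]
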